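-- pv_equiv track=rewrite | github.com/HuRuilizhen/NN-to-DAG | DATA/fcnn.py | generate_connections
-- ===== SOURCE A (Python) =====
-- def generate_connections(layer_sizes):
--     connections = []
--     node_indexs = []
--     node_index = 0
--     for layer_size in layer_sizes:
--         node_in_layer = []
--         for i in range(layer_size):
--             node_in_layer.append(node_index)
--             node_index += 1
--         node_indexs.append(node_in_layer)
--
--     for i in range(len(node_indexs)-1):
--         for j in node_indexs[i]:
--             for k in  node_indexs[i+1]:
--                 connections.append([j,k])
--
--
--     return connections
-- ===== SOURCE B (Python) =====
-- def generate_connections(layer_sizes):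
--     connections = []
--     offset = 0
--     for a, b in zip(layer_sizes, layer_sizes[1:]):
--         for t in range(a * b):
--             connections.append([offset + t // b, offset + a + t % b])
--         offset += a
--     return connections
-- ===== Notes on version B (the rewrite author's own statement) =====
-- stated objective: alternative
-- what changed: Replaces A's two-pass scheme (build an explicit per-node index table, then three nested loops over table entries) with a single pass over adjacent size pairs that decodes each of the a*b edges of a layer pair arithmetically from one flat counter t via t//b and t%b, so no node list and no inner double loop over nodes exists; Pre_ excludes exactly the lists where a meaningless negative layer size influences the result (a negative size before an edge-producing positive pair, or two adjacent negative sizes), on which A's value is an accident of range() silently yielding nothing for negatives.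
-- outside the precondition, e.g. on generate_connections([-2, -2]): A returns [], B returns [[0, -2], [-1, -3], [-1, -2], [-2, -3]]
import Mathlib
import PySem

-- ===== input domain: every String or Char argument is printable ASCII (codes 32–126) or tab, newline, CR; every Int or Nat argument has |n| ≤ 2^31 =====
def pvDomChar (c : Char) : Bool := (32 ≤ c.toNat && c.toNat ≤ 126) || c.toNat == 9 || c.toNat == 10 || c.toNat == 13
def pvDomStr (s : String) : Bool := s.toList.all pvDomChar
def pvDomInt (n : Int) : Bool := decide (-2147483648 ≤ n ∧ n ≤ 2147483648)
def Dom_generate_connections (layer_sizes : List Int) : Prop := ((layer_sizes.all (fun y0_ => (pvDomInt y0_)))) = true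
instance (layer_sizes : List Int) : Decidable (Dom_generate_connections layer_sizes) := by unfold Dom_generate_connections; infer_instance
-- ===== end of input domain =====

-- B drops A's node-index table and double node loop: one pass over adjacent size pairs, each
-- edge decoded arithmetically (t // b, t % b) from a flat counter (alternative; same cost).

-- ===== PORT A =====
def generate_connections (layer_sizes : List Int) : List (List Int) :=
  -- first loop: build node_indexs and node_index
  let st :=
    layer_sizes.foldl (fun (st : List (List Int) × Int) layer_size =>
      let inner :=
        (PySem.List.pyRange 0 layer_size 1).foldl
          (fun (acc : List Int × Int) _i => (acc.1 ++ [acc.2], acc.2 + 1)) ([], st.2)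
      (st.1 ++ [inner.1], inner.2)) ([], 0)
  let node_indexs := st.1
  -- second loop: emit connections
  (PySem.List.pyRange 0 ((node_indexs.length : Int) - 1) 1).foldl
    (fun conns i =>
      (PySem.List.pyGetD node_indexs i []).foldl
        (fun conns j =>
          (PySem.List.pyGetD node_indexs (i + 1) []).foldl
            (fun conns k => conns ++ [[j, k]]) conns) conns) []

-- ===== PORT B =====
def generate_connections_alt (layer_sizes : List Int) : List (List Int) :=
  -- zip(layer_sizes, layer_sizes[1:]): the slice [1:] is drop 1
  let st :=
    (layer_sizes.zip (layer_sizes.drop 1)).foldl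
      (fun (st : List (List Int) × Int) ab =>
        let conns :=
          (PySem.List.pyRange 0 (ab.1 * ab.2) 1).foldl
            (fun c t => c ++ [[st.2 + PySem.Int.floordiv t ab.2,
                               st.2 + ab.1 + PySem.Int.mod t ab.2]]) st.1
        (conns, st.2 + ab.1)) ([], 0)
  st.1

-- ===== PRECONDITION & SPEC =====
-- no adjacent pair of sizes is both positive (would emit edges) or both negative
def pvQuiet : List Int → Bool
  | a :: b :: t => (!(decide (0 < a) && decide (0 < b)))
      && (!(decide (a < 0) && decide (b < 0))) && pvQuiet (b :: t)
  | _ => true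

-- every size before an edge-producing pair is a genuine (nonnegative) count
def pvGood : List Int → Bool
  | [] => true
  | a :: t => if 0 ≤ a then pvGood t else pvQuiet (a :: t)

-- Pre_ excludes exactly the lists where a meaningless negative layer size influences the
-- result — a negative size before an edge-producing (positive, positive) adjacent pair, or two
-- adjacent negative sizes; there A's value is an accident of range() yielding nothing.
def Pre_generate_connections (layer_sizes : List Int) : Prop := pvGood layer_sizes = true
instance (layer_sizes : List Int) : Decidable (Pre_generate_connections layer_sizes) := by
  unfold Pre_generate_connections; infer_instance
def pvWitness_generate_connections : List Int := [2, 3, 1]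

def Spec_generate_connections (layer_sizes : List Int) (out : List (List Int)) : Prop := out = generate_connections_alt layer_sizes
instance (layer_sizes : List Int) (out : List (List Int)) : Decidable (Spec_generate_connections layer_sizes out) := by unfold Spec_generate_connections; infer_instance

-- ===== CLAIM (what is proved, stated in full; the proofs are below) =====
def Claim_equal_generate_connections : Prop := ∀ (layer_sizes : List Int), Dom_generate_connections layer_sizes → Pre_generate_connections layer_sizes → Spec_generate_connections layer_sizes (generate_connections layer_sizes)

-- ===== LEMMAS AND PROOFS =====

-- the node-index table A builds: layer k holds the range starting at the running offset
def pvTable (ls : List Int) (n : Int) : List (List Int) :=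
  match ls with
  | [] => []
  | a :: t => PySem.List.pyRange n (n + max a 0) 1 :: pvTable t (n + max a 0)

-- adjacent-pair recursion over the table
def pvPairs (f : List Int → List Int → List (List Int)) : List (List Int) → List (List Int)
  | [] => []
  | [_] => []
  | x :: y :: t => f x y ++ pvPairs f (y :: t)

-- the cross product A's double node loop emits for one table pair
def pvF : List Int → List Int → List (List Int) :=
  fun X Y => X.flatMap (fun j => Y.map (fun k => [j, k]))

-- what B's loop emits, pair by pair
def pvBSpec (o : Int) : List Int → List (List Int)
  | a :: b :: t =>
      (PySem.List.pyRange 0 (a * b) 1).map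
        (fun u => [o + PySem.Int.floordiv u b, o + a + PySem.Int.mod u b])
        ++ pvBSpec (o + a) (b :: t)
  | _ => []

-- A's inner per-layer loop appends consecutive indices
theorem pvInner_fold (l : List Int) (cs : List Int) (n : Int) :
    l.foldl (fun (acc : List Int × Int) _i => (acc.1 ++ [acc.2], acc.2 + 1)) (cs, n)
      = (cs ++ PySem.List.pyRange n (n + l.length) 1, n + l.length) := by
  induction l generalizing cs n with
  | nil => simp [PySem.List.pyRange_one_eq_nil]
  | cons x t ih =>
    simp only [List.foldl_cons, ih]
    have hb : n + ((x :: t).length : Int) = (n + 1) + (t.length : Int) := by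
      simp only [List.length_cons]; push_cast; ring
    rw [hb, PySem.List.pyRange_one_cons
      (show n < (n + 1) + (t.length : Int) by omega)]
    rw [List.append_assoc]
    rfl

-- A's first loop builds pvTable
theorem pvOuter_fold (ls : List Int) (acc : List (List Int)) (n : Int) :
    ls.foldl (fun (st : List (List Int) × Int) layer_size =>
      let inner :=
        (PySem.List.pyRange 0 layer_size 1).foldl
          (fun (acc : List Int × Int) _i => (acc.1 ++ [acc.2], acc.2 + 1)) ([], st.2)
      (st.1 ++ [inner.1], inner.2)) (acc, n)
      = (acc ++ pvTable ls n, n + ((ls.map (fun s => max s 0)).sum)) := by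
  have hfun : (fun (st : List (List Int) × Int) (layer_size : Int) =>
      let inner :=
        (PySem.List.pyRange 0 layer_size 1).foldl
          (fun (acc : List Int × Int) _i => (acc.1 ++ [acc.2], acc.2 + 1)) ([], st.2)
      (st.1 ++ [inner.1], inner.2))
      = (fun (st : List (List Int) × Int) (a : Int) =>
          (st.1 ++ [PySem.List.pyRange st.2 (st.2 + max a 0) 1], st.2 + max a 0)) := by
    funext st a
    have hlen : ((PySem.List.pyRange 0 a 1).length : Int) = max a 0 := by
      rw [PySem.List.length_pyRange_one]; omega
    simp only [pvInner_fold, List.nil_append, hlen]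
  rw [hfun]
  induction ls generalizing acc n with
  | nil => simp [pvTable]
  | cons a t ih =>
    rw [List.foldl_cons, ih]
    simp only [pvTable, List.map_cons, List.sum_cons, Prod.mk.injEq]
    refine ⟨by simp [List.append_assoc], by ring⟩

theorem pvFlatMap_congr {α β : Type} (l : List α) (f g : α → List β)
    (h : ∀ x ∈ l, f x = g x) : l.flatMap f = l.flatMap g := by
  induction l with
  | nil => rfl
  | cons a t ih =>
    simp only [List.flatMap_cons]
    rw [h a (by simp), ih (fun x hx => h x (by simp [hx]))]

-- index loop over adjacent entries of a table = adjacent-pair recursion (Nat form)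
theorem pvRangePairs (f : List Int → List Int → List (List Int)) (T : List (List Int)) :
    (List.range (T.length - 1)).flatMap (fun k => f (T.getD k []) (T.getD (k + 1) []))
      = pvPairs f T := by
  induction T with
  | nil => simp [pvPairs]
  | cons x T ih =>
    cases T with
    | nil => simp [pvPairs]
    | cons y t =>
      have hlen : (x :: y :: t).length - 1 = ((y :: t).length - 1) + 1 := by
        simp [List.length_cons]
      rw [hlen, List.range_succ_eq_map]
      simp only [List.flatMap_cons, List.flatMap_map]
      have : ((List.range ((y :: t).length - 1)).flatMap
          (fun k => f ((x :: y :: t).getD (k + 1) []) ((x :: y :: t).getD (k + 1 + 1) [])))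
          = (List.range ((y :: t).length - 1)).flatMap
            (fun k => f ((y :: t).getD k []) ((y :: t).getD (k + 1) [])) := by
        apply pvFlatMap_congr; intro k _; rfl
      rw [this, ih]
      rfl

-- the same, Int range form
theorem pvIdxPairs (f : List Int → List Int → List (List Int)) (T : List (List Int)) :
    (PySem.List.pyRange 0 ((T.length : Int) - 1) 1).flatMap
      (fun i => f (PySem.List.pyGetD T i []) (PySem.List.pyGetD T (i + 1) []))
      = pvPairs f T := by
  rw [PySem.List.pyRange_one]
  have htn : (((T.length : Int) - 1) - 0).toNat = T.length - 1 := by omega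
  rw [htn, List.flatMap_map]
  rw [← pvRangePairs f T]
  apply pvFlatMap_congr
  intro k _
  have h2 : (0 : Int) + (k : Int) + 1 = (((k + 1 : Nat)) : Int) := by push_cast; ring
  have h1 : (0 : Int) + (k : Int) = ((k : Nat) : Int) := by ring
  rw [h2, h1, PySem.List.pyGetD_natCast, PySem.List.pyGetD_natCast]

-- B's divmod decoding of one layer pair equals the nested-range cross product
theorem pvDivmodBlock (m n : Nat) (o d : Int) :
    (PySem.List.pyRange 0 ((m : Int) * (n : Int)) 1).map
      (fun t => [o + PySem.Int.floordiv t (n : Int), d + PySem.Int.mod t (n : Int)])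
      = (PySem.List.pyRange o (o + (m : Int)) 1).flatMap (fun j =>
          (PySem.List.pyRange d (d + (n : Int)) 1).map (fun k => [j, k])) := by
  rcases Nat.eq_zero_or_pos n with hn | hn
  · subst hn
    simp [PySem.List.pyRange_one_eq_nil]
  · induction m with
    | zero => simp [PySem.List.pyRange_one_eq_nil]
    | succ m ih =>
      have hpos : (0 : Int) < (n : Int) := by exact_mod_cast hn
      have hcast : ((m + 1 : Nat) : Int) * (n : Int) = (m : Int) * n + n := by push_cast; ring
      rw [hcast,
        PySem.List.pyRange_one_append 0 ((m : Int) * n) ((m : Int) * n + n)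
          (by positivity) (by linarith),
        List.map_append, ih]
      have hR : o + ((m + 1 : Nat) : Int) = (o + (m : Int)) + 1 := by push_cast; ring
      rw [hR, PySem.List.pyRange_one_succ_right (by simp), List.flatMap_append,
        List.flatMap_cons, List.flatMap_nil, List.append_nil]
      congr 1
      apply List.ext_getElem
      · simp only [List.length_map, PySem.List.length_pyRange_one]
        rw [show ((m : Int) * n + n - (m : Int) * n) = (n : Int) from by ring]
        omega
      · intro i h1 h2
        simp only [List.getElem_map, PySem.List.getElem_pyRange_one]
        have hi : (i : Int) < (n : Int) := by
          simp only [List.length_map, PySem.List.length_pyRange_one] at h1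
          rw [show ((m : Int) * n + n - (m : Int) * n) = (n : Int) from by ring] at h1
          omega
        have hi0 : (0 : Int) ≤ (i : Int) := by positivity
        have hdiv : PySem.Int.floordiv ((m : Int) * n + (i : Int)) (n : Int) = (m : Int) := by
          rw [PySem.Int.floordiv_eq_iff_of_pos hpos]
          constructor
          · linarith
          · nlinarith
        have hmod : PySem.Int.mod ((m : Int) * n + (i : Int)) (n : Int) = (i : Int) := by
          have h3 := PySem.Int.floordiv_mul_add_mod ((m : Int) * n + (i : Int)) (n : Int)
          rw [hdiv] at h3
          linarith
        simp [hdiv, hmod]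

-- B's fold equals pvBSpec, on every input
theorem pvB_fold (ls : List Int) (acc : List (List Int)) (o : Int) :
    ((ls.zip (ls.drop 1)).foldl
      (fun (st : List (List Int) × Int) ab =>
        let conns :=
          (PySem.List.pyRange 0 (ab.1 * ab.2) 1).foldl
            (fun c t => c ++ [[st.2 + PySem.Int.floordiv t ab.2,
                               st.2 + ab.1 + PySem.Int.mod t ab.2]]) st.1
        (conns, st.2 + ab.1)) (acc, o))
      = (acc ++ pvBSpec o ls, o + (ls.dropLast.sum)) := by
  induction ls generalizing acc o with
  | nil => simp [pvBSpec]
  | cons a t ih =>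
    cases t with
    | nil => simp [pvBSpec]
    | cons b t' =>
      simp only [List.drop_succ_cons, List.drop_zero, List.zip_cons_cons, List.foldl_cons]
      have hstep : (PySem.List.pyRange 0 (a * b) 1).foldl
          (fun c t => c ++ [[o + PySem.Int.floordiv t b, o + a + PySem.Int.mod t b]]) acc
          = acc ++ (PySem.List.pyRange 0 (a * b) 1).map
              (fun u => [o + PySem.Int.floordiv u b, o + a + PySem.Int.mod u b]) :=
        PySem.List.foldl_append_singleton_eq_map _ _ _
      have hzip : (b :: t').zip t' = (b :: t').zip ((b :: t').drop 1) := by simp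
      simp only [hstep]
      rw [hzip, ih (acc ++ _) (o + a)]
      simp only [pvBSpec, List.append_assoc, Prod.mk.injEq, List.dropLast_cons₂, List.sum_cons]
      exact ⟨trivial, by ring⟩

-- sizes not both positive and not both negative multiply to a nonpositive product
theorem pvMulNonpos {a b : Int} (h1 : ¬(0 < a ∧ 0 < b)) (h2 : ¬(a < 0 ∧ b < 0)) :
    a * b ≤ 0 := by
  rcases lt_trichotomy a 0 with ha | ha | ha
  · have hb : 0 ≤ b := by by_contra hb; exact h2 ⟨ha, by omega⟩
    nlinarith
  · simp [ha]
  · have hb : b ≤ 0 := by by_contra hb; exact h1 ⟨ha, by omega⟩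
    nlinarith

theorem pvQuiet_cons {a b : Int} {t : List Int} (h : pvQuiet (a :: b :: t) = true) :
    ¬(0 < a ∧ 0 < b) ∧ ¬(a < 0 ∧ b < 0) ∧ pvQuiet (b :: t) = true := by
  simp only [pvQuiet, Bool.and_eq_true, Bool.not_eq_eq_eq_not, Bool.not_true,
    Bool.and_eq_false_iff, decide_eq_false_iff_not] at h
  constructor
  · rcases h.1.1 with h' | h' <;> tauto
  constructor
  · rcases h.1.2 with h' | h' <;> tauto
  · exact h.2

-- on a quiet suffix B emits nothing
theorem pvBSpec_quiet (ls : List Int) (o : Int) (h : pvQuiet ls = true) :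
    pvBSpec o ls = [] := by
  induction ls generalizing o with
  | nil => rfl
  | cons a t ih =>
    cases t with
    | nil => rfl
    | cons b t' =>
      obtain ⟨h1, h2, h3⟩ := pvQuiet_cons h
      simp only [pvBSpec]
      rw [PySem.List.pyRange_one_eq_nil (pvMulNonpos h1 h2), List.map_nil, List.nil_append]
      exact ih (o + a) h3

-- on a quiet suffix A's table pairs emit nothing
theorem pvTable_quiet (ls : List Int) (n : Int) (h : pvQuiet ls = true) :
    pvPairs pvF (pvTable ls n) = [] := by
  induction ls generalizing n with
  | nil => rfl
  | cons a t ih =>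
    cases t with
    | nil => rfl
    | cons b t' =>
      obtain ⟨h1, h2, _⟩ := pvQuiet_cons h
      simp only [pvTable, pvPairs]
      have hhead : pvF (PySem.List.pyRange n (n + max a 0) 1)
          (PySem.List.pyRange (n + max a 0) (n + max a 0 + max b 0) 1) = [] := by
        rcases not_and_or.mp h1 with h' | h'
        · have hma : max a 0 = 0 := by omega
          rw [hma, add_zero, PySem.List.pyRange_one_eq_nil (le_refl n)]
          rfl
        · have hmb : max b 0 = 0 := by omega
          rw [hmb, add_zero, PySem.List.pyRange_one_eq_nil (le_refl (n + max a 0))]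
          unfold pvF
          rw [pvFlatMap_congr _ _ (fun _ => []) (by intro x _; simp)]
          simp
      rw [hhead, List.nil_append]
      exact ih (n + max a 0) (pvQuiet_cons h).2.2

-- main equivalence of the two per-pair recursions, under Pre_
theorem pvMain (ls : List Int) (o : Int) (h : pvGood ls = true) :
    pvPairs pvF (pvTable ls o) = pvBSpec o ls := by
  induction ls generalizing o with
  | nil => rfl
  | cons a t ih =>
    by_cases ha : 0 ≤ a
    · have hg : pvGood t = true := by simpa [pvGood, ha] using h
      cases t with
      | nil => rfl
      | cons b t' =>
        simp only [pvTable, pvPairs, pvBSpec]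
        have hma : max a 0 = a := by omega
        by_cases hb : 0 ≤ b
        · have hmb : max b 0 = b := by omega
          rw [hma, hmb]
          have hhead : pvF (PySem.List.pyRange o (o + a) 1)
              (PySem.List.pyRange (o + a) (o + a + b) 1)
              = (PySem.List.pyRange 0 (a * b) 1).map
                  (fun u => [o + PySem.Int.floordiv u b, o + a + PySem.Int.mod u b]) := by
            have hca : a = ((a.toNat : Nat) : Int) := by omega
            have hcb : b = ((b.toNat : Nat) : Int) := by omega
            unfold pvF
            rw [hca, hcb]
            exact (pvDivmodBlock a.toNat b.toNat o (o + ((a.toNat : Nat) : Int))).symm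
          rw [hhead]
          congr 1
          have := ih (o + a) hg
          simpa [pvTable, hmb] using this
        · -- b < 0: the head pair emits nothing on either side, and the whole tail is quiet
          have hq : pvQuiet (b :: t') = true := by
            simpa [pvGood, show ¬(0 ≤ b) from hb] using hg
          have hhead : pvF (PySem.List.pyRange o (o + max a 0) 1)
              (PySem.List.pyRange (o + max a 0) (o + max a 0 + max b 0) 1) = [] := by
            have hmb : max b 0 = 0 := by omega
            rw [hmb, add_zero, PySem.List.pyRange_one_eq_nil (le_refl (o + max a 0))]
            unfold pvF
            rw [pvFlatMap_congr _ _ (fun _ => []) (by intro x _; simp)]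
            simp
          have hab : a * b ≤ 0 := by nlinarith [lt_of_not_ge hb]
          rw [hhead, List.nil_append,
            PySem.List.pyRange_one_eq_nil hab, List.map_nil, List.nil_append]
          have hT := pvTable_quiet (b :: t') (o + max a 0) hq
          have hB := pvBSpec_quiet (b :: t') (o + a) hq
          simp only [pvTable] at hT
          rw [hT, hB]
    · have hq : pvGood (a :: t) = pvQuiet (a :: t) := by simp [pvGood, ha]
      rw [hq] at h
      rw [pvTable_quiet _ _ h, pvBSpec_quiet _ _ h]

-- ===== VERDICT (by name: the statement is the Claim_ definition above) =====
theorem generate_connections_spec : Claim_equal_generate_connections := by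
  intro ls _ hpre
  unfold Spec_generate_connections generate_connections generate_connections_alt
  simp only []
  rw [pvOuter_fold, pvB_fold ls]
  simp only [List.nil_append]
  -- rewrite A's triple foldl into flatMap form
  have hA : ∀ (r : List Int) (T : List (List Int)),
      r.foldl (fun conns i =>
        (PySem.List.pyGetD T i []).foldl
          (fun conns j =>
            (PySem.List.pyGetD T (i + 1) []).foldl
              (fun conns k => conns ++ [[j, k]]) conns) conns) ([] : List (List Int))
        = r.flatMap (fun i =>
            (PySem.List.pyGetD T i []).flatMap (fun j =>
              (PySem.List.pyGetD T (i + 1) []).map (fun k => [j, k]))) := by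
    intro r T
    have h1 : ∀ (i : Int) (conns : List (List Int)),
        (PySem.List.pyGetD T i []).foldl
          (fun conns j =>
            (PySem.List.pyGetD T (i + 1) []).foldl
              (fun conns k => conns ++ [[j, k]]) conns) conns
        = conns ++ (PySem.List.pyGetD T i []).flatMap (fun j =>
            (PySem.List.pyGetD T (i + 1) []).map (fun k => [j, k])) := by
      intro i conns
      rw [← PySem.List.foldl_append_eq_flatMap]
      apply PySem.List.foldl_congr_mem
      intro acc j _
      exact PySem.List.foldl_append_singleton_eq_map _ _ _
    calc r.foldl _ ([] : List (List Int))
        = [] ++ r.flatMap (fun i =>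
            (PySem.List.pyGetD T i []).flatMap (fun j =>
              (PySem.List.pyGetD T (i + 1) []).map (fun k => [j, k]))) := by
          rw [← PySem.List.foldl_append_eq_flatMap]
          apply PySem.List.foldl_congr_mem
          intro acc i _
          exact h1 i acc
      _ = _ := by simp
  rw [hA]
  rw [show (fun (i : Int) =>
      (PySem.List.pyGetD (pvTable ls 0) i []).flatMap (fun j =>
        (PySem.List.pyGetD (pvTable ls 0) (i + 1) []).map (fun k => [j, k])))
      = (fun (i : Int) => pvF (PySem.List.pyGetD (pvTable ls 0) i [])
          (PySem.List.pyGetD (pvTable ls 0) (i + 1) [])) from rfl]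
  rw [pvIdxPairs pvF (pvTable ls 0)]
  exact pvMain ls 0 hpre
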